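-- pv_equiv track=rewrite | github.com/ben-nour/advent_of_code_2024 | scripts/day_four.py | create_surrounding_grid
-- ===== SOURCE A (Python) =====
-- def create_surrounding_grid(letters):
--     grid = ""
--     counter = 0
--     for letter in letters:
--         if counter == 11:
--             grid += letter
--             grid += "\n"
--             counter = 0
--             continue
--         grid += letter
--         counter += 1
--     return grid
-- ===== SOURCE B (Python) =====
-- def create_surrounding_grid(letters):
--     letters = list(letters)
--     parts = []
--     i = 0
--     while i < len(letters):
--         chunk = letters[i:i+12]
--         parts.append(''.join(chunk))
--         if len(chunk) == 12:
--             parts.append('\n')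
--         i += 12
--     return ''.join(parts)
-- ===== Notes on version B (the rewrite author's own statement) =====
-- stated objective: simpler
-- what changed: Replaces the per-character accumulation with a manual newline counter by an index-strided pass that slices 12-character chunks and appends a newline only after full chunks.
import Mathlib
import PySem

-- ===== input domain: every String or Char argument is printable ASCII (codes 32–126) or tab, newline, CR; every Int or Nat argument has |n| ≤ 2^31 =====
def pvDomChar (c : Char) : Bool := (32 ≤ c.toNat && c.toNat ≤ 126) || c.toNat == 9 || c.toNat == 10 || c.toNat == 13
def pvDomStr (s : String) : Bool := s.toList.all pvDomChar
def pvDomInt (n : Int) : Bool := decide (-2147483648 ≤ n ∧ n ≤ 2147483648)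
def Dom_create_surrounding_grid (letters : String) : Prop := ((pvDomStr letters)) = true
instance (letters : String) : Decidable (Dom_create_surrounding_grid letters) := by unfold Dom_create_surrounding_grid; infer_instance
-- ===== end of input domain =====

-- B inserts a newline after every full block of 12 characters by slicing chunks, instead of A's per-character counter; same result, simpler decomposition.

-- ===== PORT A =====
-- the for-loop of A: state = (grid so far, counter)
def pvGoA : List Char → List Char → Nat → List Char
  | [], grid, _ => grid
  | c :: rest, grid, counter =>
    if counter == 11 then pvGoA rest (grid ++ [c, '\n']) 0
    else pvGoA rest (grid ++ [c]) (counter + 1)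

def create_surrounding_grid (letters : String) : String :=
  String.mk (pvGoA letters.toList [] 0)

-- ===== PORT B =====
-- the while-loop of B: index i strides by 12, each chunk is the slice letters[i:i+12]
def pvGoB (l : List Char) (i : Nat) : List Char :=
  if l.length ≤ i then []
  else
    PySem.List.slice l (some (i : Int)) (some ((i : Int) + 12)) ++
      (if (PySem.List.slice l (some (i : Int)) (some ((i : Int) + 12))).length == 12
        then ['\n'] else []) ++ pvGoB l (i + 12)
termination_by l.length - i
decreasing_by omega

def create_surrounding_grid_alt (letters : String) : String :=
  String.mk (pvGoB letters.toList 0)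

-- ===== PRECONDITION & SPEC =====
def Spec_create_surrounding_grid (letters : String) (out : String) : Prop := out = create_surrounding_grid_alt letters
instance (letters : String) (out : String) : Decidable (Spec_create_surrounding_grid letters out) := by unfold Spec_create_surrounding_grid; infer_instance

-- ===== CLAIM (what is proved, stated in full; the proofs are below) =====
def Claim_equal_create_surrounding_grid : Prop := ∀ (letters : String), Dom_create_surrounding_grid letters → Spec_create_surrounding_grid letters (create_surrounding_grid letters)

-- ===== LEMMAS AND PROOFS =====

-- countdown form of A's loop: m chars remain before the newline slot
def pvGoC : Nat → List Char → List Char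
  | _, [] => []
  | 0, c :: rest => c :: '\n' :: pvGoC 11 rest
  | m + 1, c :: rest => c :: pvGoC m rest

lemma pvGoA_acc (l : List Char) : ∀ grid k, k ≤ 11 →
    pvGoA l grid k = grid ++ pvGoC (11 - k) l := by
  induction l with
  | nil => intro grid k _; simp [pvGoA, pvGoC]
  | cons c rest ih =>
    intro grid k hk
    have h0 : (0 : Nat) ≤ 11 := by omega
    by_cases h : k = 11
    · subst h
      have hih := ih (grid ++ [c, '\n']) 0 h0
      simp [pvGoA, hih, pvGoC]
    · have hk' : k + 1 ≤ 11 := by omega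
      have hih := ih (grid ++ [c]) (k + 1) hk'
      have hm : 11 - k = (11 - (k + 1)) + 1 := by omega
      simp [pvGoA, h, hih, hm, pvGoC]

lemma pvGoC_chunk (l : List Char) : ∀ m,
    pvGoC m l = l.take (m + 1) ++
      (if m + 1 ≤ l.length then '\n' :: pvGoC 11 (l.drop (m + 1)) else []) := by
  induction l with
  | nil => intro m; simp [pvGoC]
  | cons c rest ih =>
    intro m
    cases m with
    | zero => simp [pvGoC]
    | succ m' =>
      have hcond : m' + 1 + 1 ≤ rest.length + 1 ↔ m' + 1 ≤ rest.length := by omega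
      simp [pvGoC, ih m', List.take_succ_cons, List.drop_succ_cons, hcond]

lemma pvGoC_eq_pvGoB (l : List Char) : ∀ i, pvGoC 11 (l.drop i) = pvGoB l i := by
  intro i
  induction hn : l.length - i using Nat.strong_induction_on generalizing i with
  | _ n ih =>
    rw [pvGoC_chunk, pvGoB]
    have hsl : PySem.List.slice l (some (i : Int)) (some ((i : Int) + 12)) =
        (l.drop i).take 12 := by
      have := PySem.List.slice_natCast_add l i 12
      simpa using this
    by_cases h : l.length ≤ i
    · have hd : l.drop i = [] := List.drop_eq_nil_of_le h
      simp [hd, h]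
    · have hlen : (l.drop i).length = l.length - i := List.length_drop
      rw [if_neg h, hsl]
      have hrec : pvGoC 11 (l.drop (i + 12)) = pvGoB l (i + 12) := by
        subst hn
        exact ih _ (by omega) _ rfl
      have hdd : (l.drop i).drop 12 = l.drop (i + 12) := by
        simp [List.drop_drop]
      by_cases h12 : 12 ≤ (l.drop i).length
      · have ht : ((l.drop i).take 12).length = 12 := by
          rw [List.length_take]; omega
        rw [if_pos (by omega : 11 + 1 ≤ (l.drop i).length), hdd, hrec, ht]
        simp
      · have ht : (((l.drop i).take 12).length == 12) = false := by
          simp only [beq_eq_false_iff_ne, List.length_take]; omega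
        have hd2 : l.drop (i + 12) = [] := by
          apply List.drop_eq_nil_of_le; omega
        have hB : pvGoB l (i + 12) = [] := by
          rw [pvGoB]; simp [show l.length ≤ i + 12 by omega]
        rw [if_neg (by omega : ¬ 11 + 1 ≤ (l.drop i).length), ht, hB]
        simp

-- ===== VERDICT (by name: the statement is the Claim_ definition above) =====
theorem create_surrounding_grid_spec : Claim_equal_create_surrounding_grid := by
  intro letters _
  unfold Spec_create_surrounding_grid create_surrounding_grid create_surrounding_grid_alt
  rw [pvGoA_acc _ [] 0 (by omega), ← pvGoC_eq_pvGoB _ 0]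
  simp
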